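-- pv_equiv track=rewrite | github.com/69Jesse/PyHTSL | pyhtsl/utils/compute_layout.py | get_formatting_codes
-- ===== SOURCE A (Python) =====
-- def get_formatting_codes(text: str) -> list[list[str]]:
--     result: list[list[str]] = []
--     active_codes: list[str] = []
--     i = 0
--
--     additive_codes = set('klmno')
--     color_codes = set('0123456789abcdef')
--     reset_codes = {'r'}
--
--     while i < len(text):
--         if text[i] == '&' and i + 1 < len(text):
--             code = text[i + 1]
--
--             if code in color_codes:
--                 # Reset, then reapply this color (even if it's the same as previous)
--                 count = active_codes.count(code)
--                 active_codes = [code for _ in range(count + 1)]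
--                 i += 2
--                 continue
--
--             elif code in additive_codes:
--                 active_codes.append(code)
--                 i += 2
--                 continue
--
--             elif code in reset_codes:
--                 active_codes = []
--                 i += 2
--                 continue
--
--         if text[i] == '\n':
--             active_codes = []
--
--         result.append(active_codes.copy())
--         i += 1
--
--     return result
-- ===== SOURCE B (Python) =====
-- def get_formatting_codes(text: str) -> list[list[str]]:
--     COLORS = set('0123456789abcdef')
--     ADDITIVE = set('klmno')
--     # pass 1: tokenize into ('code', c) control events and ('lit', ch) literal chars
--     tokens = []
--     i = 0
--     n = len(text)
--     while i < n:
--         ch = text[i]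
--         if ch == '&' and i + 1 < n:
--             c = text[i + 1]
--             if c in COLORS or c in ADDITIVE or c == 'r':
--                 tokens.append(('code', c))
--                 i += 2
--                 continue
--         tokens.append(('lit', ch))
--         i += 1
--     # pass 2: fold over tokens maintaining the active codes
--     result = []
--     active = []
--     for kind, c in tokens:
--         if kind == 'code':
--             if c in COLORS:
--                 active = [c] * (active.count(c) + 1)
--             elif c in ADDITIVE:
--                 active.append(c)
--             else:
--                 active = []
--         else:
--             if c == '\n':
--                 active = []
--             result.append(active.copy())
--     return result
-- ===== Notes on version B (the rewrite author's own statement) =====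
-- stated objective: alternative
-- what changed: Single index-driven scan with lookahead and fall-through replaced by a two-phase parse-then-fold: the text is first tokenized into control events and literal characters, then a separate fold over the token list maintains the active codes and emits the rows.
import Mathlib
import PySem

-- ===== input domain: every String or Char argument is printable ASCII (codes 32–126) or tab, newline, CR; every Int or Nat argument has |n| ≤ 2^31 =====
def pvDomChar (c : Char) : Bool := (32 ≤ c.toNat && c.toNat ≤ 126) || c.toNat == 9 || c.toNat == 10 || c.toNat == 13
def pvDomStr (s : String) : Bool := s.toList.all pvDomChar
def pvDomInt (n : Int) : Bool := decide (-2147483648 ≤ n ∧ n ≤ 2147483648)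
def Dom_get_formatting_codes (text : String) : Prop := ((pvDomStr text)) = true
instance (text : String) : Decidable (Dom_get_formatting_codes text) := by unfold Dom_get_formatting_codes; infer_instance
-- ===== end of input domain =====

-- B replaces A's single index-driven scan by a two-phase parse-then-fold (tokenize, then fold); same cost, alternative decomposition.


-- ===== PORT A =====
-- additive_codes = set('klmno'); color_codes = set('0123456789abcdef'); reset_codes = {'r'}
def pvColorCodes : List Char := ['0','1','2','3','4','5','6','7','8','9','a','b','c','d','e','f']
def pvAdditiveCodes : List Char := ['k','l','m','n','o']

-- the while loop of A: i advances by 2 on '&'+valid code (no output), else by 1 (output a row)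
def pvGoA : List Char → List String → List (List String)
  | [], _ => []
  | '&' :: code :: rest, activeCodes =>
      if pvColorCodes.contains code then
        -- count = active_codes.count(code); active_codes = [code]*(count+1)
        pvGoA rest (List.replicate (activeCodes.count code.toString + 1) code.toString)
      else if pvAdditiveCodes.contains code then
        pvGoA rest (activeCodes ++ [code.toString])
      else if code = 'r' then
        pvGoA rest []
      else
        -- fall through: text[i] = '&' ≠ '\n', append a copy, i += 1
        activeCodes :: pvGoA (code :: rest) activeCodes
  | c :: rest, activeCodes =>
      let activeCodes' := if c = '\n' then [] else activeCodes
      activeCodes' :: pvGoA rest activeCodes'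

def get_formatting_codes (text : String) : List (List String) :=
  pvGoA text.toList []

-- ===== PORT B =====
def pvBColors : List Char := ['0','1','2','3','4','5','6','7','8','9','a','b','c','d','e','f']
def pvBAdditive : List Char := ['k','l','m','n','o']

inductive PvTok where
  | code : Char → PvTok
  | lit : Char → PvTok
deriving DecidableEq, Repr

def pvIsCode (c : Char) : Bool :=
  pvColorCodes.contains c || pvAdditiveCodes.contains c || c = 'r'

-- pass 1: tokenize
def pvTokenize : List Char → List PvTok
  | '&' :: c :: rest =>
      if pvIsCode c then PvTok.code c :: pvTokenize rest
      else PvTok.lit '&' :: pvTokenize (c :: rest)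
  | c :: rest => PvTok.lit c :: pvTokenize rest
  | [] => []

-- pass 2: one fold step over a token, state = (active, result)
def pvStep (st : List String × List (List String)) (t : PvTok) : List String × List (List String) :=
  match t with
  | PvTok.code c =>
      if pvBColors.contains c then
        (List.replicate (st.1.count c.toString + 1) c.toString, st.2)
      else if pvBAdditive.contains c then
        (st.1 ++ [c.toString], st.2)
      else
        ([], st.2)
  | PvTok.lit c =>
      let active := if c = '\n' then [] else st.1
      (active, st.2 ++ [active])

def get_formatting_codes_alt (text : String) : List (List String) :=
  ((pvTokenize text.toList).foldl pvStep ([], [])).2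

-- ===== PRECONDITION & SPEC =====
def Spec_get_formatting_codes (text : String) (out : List (List String)) : Prop := out = get_formatting_codes_alt text
instance (text : String) (out : List (List String)) : Decidable (Spec_get_formatting_codes text out) := by unfold Spec_get_formatting_codes; infer_instance

-- ===== CLAIM (what is proved, stated in full; the proofs are below) =====
def Claim_equal_get_formatting_codes : Prop := ∀ (text : String), Dom_get_formatting_codes text → Spec_get_formatting_codes text (get_formatting_codes text)

-- ===== LEMMAS AND PROOFS =====

-- B's code lists are (definitionally) A's
lemma pvBColors_eq : pvBColors = pvColorCodes := rfl
lemma pvBAdditive_eq : pvBAdditive = pvAdditiveCodes := rfl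

-- tokenizing a list not starting with '&' peels one literal token
lemma pvTokenize_cons_ne (c : Char) (rest : List Char) (hc : c ≠ '&') :
    pvTokenize (c :: rest) = PvTok.lit c :: pvTokenize rest := by
  cases rest <;> simp [pvTokenize, hc]

-- A's loop on a list not starting with '&' emits one row
lemma pvGoA_cons_ne (c : Char) (rest : List Char) (ac : List String) (hc : c ≠ '&') :
    pvGoA (c :: rest) ac =
      (if c = '\n' then [] else ac) :: pvGoA rest (if c = '\n' then [] else ac) := by
  cases rest <;> simp [pvGoA, hc]

-- B's fold over the tokens of cs, started at (ac, res), appends exactly A's rows for cs from ac.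
lemma pvKey : ∀ (cs : List Char) (ac : List String) (res : List (List String)),
    (List.foldl pvStep (ac, res) (pvTokenize cs)).2 = res ++ pvGoA cs ac := by
  intro cs ac
  induction cs, ac using pvGoA.induct with
  | case1 ac => intro res; simp [pvTokenize, pvGoA]
  | case2 code rest ac h ih =>
      intro res
      have hm : code ∈ pvColorCodes := by simpa using h
      simp only [pvTokenize, pvIsCode, h, Bool.true_or, if_pos]
      simp only [List.foldl_cons, pvStep, pvBColors_eq, h, if_pos]
      simpa [pvGoA, hm] using ih res
  | case3 code rest ac h1 h2 ih =>
      intro res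
      have hm1 : code ∉ pvColorCodes := by simpa using h1
      have hm2 : code ∈ pvAdditiveCodes := by simpa using h2
      simp only [pvTokenize, pvIsCode, h1, h2, Bool.false_or, Bool.true_or, if_pos]
      simp only [List.foldl_cons, pvStep, pvBColors_eq, pvBAdditive_eq, h1, h2, if_pos]
      simpa [pvGoA, hm1, hm2] using ih res
  | case4 rest ac h1 h2 ih =>
      intro res
      have hm1 : ('r' : Char) ∉ pvColorCodes := by decide
      have hm2 : ('r' : Char) ∉ pvAdditiveCodes := by decide
      simp only [pvTokenize, pvIsCode, h1, h2, Bool.false_or, decide_true, if_pos]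
      simp only [List.foldl_cons, pvStep, pvBColors_eq, pvBAdditive_eq, h1, h2]
      simpa [pvGoA, hm1, hm2] using ih res
  | case5 code rest ac h1 h2 h3 ih =>
      intro res
      have hm1 : code ∉ pvColorCodes := by simpa using h1
      have hm2 : code ∉ pvAdditiveCodes := by simpa using h2
      have hnc : pvIsCode code = false := by
        simp [pvIsCode, h3]
        exact ⟨hm1, hm2⟩
      simp only [pvTokenize, hnc, Bool.false_eq_true, if_neg, not_false_iff]
      simp only [List.foldl_cons, pvStep]
      have hamp : ('&' : Char) ≠ '\n' := by decide
      simp only [hamp, if_neg, not_false_iff]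
      rw [ih]
      simp [pvGoA, hm1, hm2, h3]
  | case6 c rest ac h ac2 ih =>
      intro res
      by_cases hc : c = '&'
      · subst hc
        have hrest : rest = [] := by
          cases rest with
          | nil => rfl
          | cons a b => exact (h a b rfl rfl).elim
        subst hrest
        simp [pvTokenize, pvGoA, pvStep]
      · rw [pvTokenize_cons_ne c rest hc, pvGoA_cons_ne c rest ac hc]
        simp only [List.foldl_cons, pvStep]
        rw [ih]
        simp [ac2]

-- ===== VERDICT (by name: the statement is the Claim_ definition above) =====
theorem get_formatting_codes_spec : Claim_equal_get_formatting_codes := by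
  intro text _
  unfold Spec_get_formatting_codes get_formatting_codes get_formatting_codes_alt
  rw [pvKey]
  simp
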